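-- pv_equiv track=rewrite | github.com/clthuang/pedantic-drip | plugins/pd/hooks/lib/pattern_promotion/classifier.py | decide_target
-- ===== SOURCE A (Python) =====
-- from typing import Optional
--
-- def decide_target(scores: dict[str, int]) -> Optional[str]:
--     """FR-2b: strictly-highest winner, else None (escalate to LLM fallback)."""
--     if not scores:
--         return None
--     max_score = max(scores.values())
--     if max_score == 0:
--         return None
--     winners = [t for t, s in scores.items() if s == max_score]
--     if len(winners) == 1:
--         return winners[0]
--     return None
-- ===== SOURCE B (Python) =====
-- from typing import Optional
--
-- def decide_target(scores: dict[str, int]) -> Optional[str]: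
--     """Single pass: track best key, best score, and tie count."""
--     best_key = None
--     best_score = None
--     ties = 0
--     for k, s in scores.items():
--         if best_score is None or s > best_score:
--             best_key, best_score, ties = k, s, 1
--         elif s == best_score:
--             ties += 1
--     if best_score is None or best_score == 0 or ties != 1:
--         return None
--     return best_key
-- ===== Notes on version B (the rewrite author's own statement) =====
-- stated objective: simpler
-- what changed: Replaces A's three passes (max over values, filter of tying items, length check) by one pass over the items maintaining best key, best score and a tie counter.
import Mathlib
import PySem

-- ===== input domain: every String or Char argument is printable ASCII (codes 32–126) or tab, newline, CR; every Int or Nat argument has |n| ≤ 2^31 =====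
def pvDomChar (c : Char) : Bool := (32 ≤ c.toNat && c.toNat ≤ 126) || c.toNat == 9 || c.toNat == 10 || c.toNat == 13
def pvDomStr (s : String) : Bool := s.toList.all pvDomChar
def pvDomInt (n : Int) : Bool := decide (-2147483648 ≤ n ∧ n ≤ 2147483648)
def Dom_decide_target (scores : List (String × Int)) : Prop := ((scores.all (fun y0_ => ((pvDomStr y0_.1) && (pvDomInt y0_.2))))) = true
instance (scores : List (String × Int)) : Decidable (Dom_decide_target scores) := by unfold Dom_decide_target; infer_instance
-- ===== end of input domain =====

-- ===== PORT A =====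
-- A: three passes — max over the values, filter the tying keys, check there is one winner.
def decide_target (scores : List (String × Int)) : Option String :=
  if scores = [] then none
  else
    match PySem.List.max? (scores.map Prod.snd) (fun x => x) with
    | none => none
    | some max_score =>
      if max_score = 0 then none
      else
        let winners := (scores.filter (fun p => p.2 = max_score)).map Prod.fst
        if winners.length = 1 then winners.head? else none

-- ===== PORT B =====
-- B: one pass maintaining (best_key, best_score, ties); state none = "no item seen yet".
def dtLoop (st : Option (String × Int × Int)) (p : String × Int) : Option (String × Int × Int) :=
  match st with
  | none => some (p.1, p.2, 1)
  | some (bk, bs, t) =>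
    if p.2 > bs then some (p.1, p.2, 1)
    else if p.2 = bs then some (bk, bs, t + 1)
    else some (bk, bs, t)

def decide_target_alt (scores : List (String × Int)) : Option String :=
  match scores.foldl dtLoop none with
  | none => none
  | some (bk, bs, t) => if bs = 0 ∨ t ≠ 1 then none else some bk

-- ===== PRECONDITION & SPEC =====
def Spec_decide_target (scores : List (String × Int)) (out : Option String) : Prop := out = decide_target_alt scores
instance (scores : List (String × Int)) (out : Option String) : Decidable (Spec_decide_target scores out) := by unfold Spec_decide_target; infer_instance

-- ===== CLAIM (what is proved, stated in full; the proofs are below) =====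
def Claim_equal_decide_target : Prop := ∀ (scores : List (String × Int)), Dom_decide_target scores → Spec_decide_target scores (decide_target scores)

-- ===== LEMMAS AND PROOFS =====

-- Characterisation of B's fold from a running state (bk, bs, c):
-- the final score is the running max, the count is the number of maximal items
-- (plus c when bs itself stays maximal), and the key is bk or the first maximal item of t.
theorem dtLoop_fold_char (t : List (String × Int)) : ∀ (bk : String) (bs : Int) (c : Int),
    ∃ K M C, t.foldl dtLoop (some (bk, bs, c)) = some (K, M, C) ∧
      M = (t.map Prod.snd).foldl max bs ∧
      C = (if bs = M then c else 0) + ((t.filter (fun p => p.2 = M)).length : Int) ∧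
      (if bs = M then K = bk else t.find? (fun p => p.2 = M) = some (K, M)) := by
  induction t with
  | nil => intro bk bs c; exact ⟨bk, bs, c, rfl, rfl, by simp, by simp⟩
  | cons hd tl ih =>
    intro bk bs c
    obtain ⟨k, s⟩ := hd
    by_cases hgt : s > bs
    · obtain ⟨K, M, C, hfold, hM, hC, hK⟩ := ih k s 1
      have hmax : max bs s = s := by omega
      have hsM : s ≤ M := by rw [hM]; exact (PySem.List.le_foldl_max _ _).1
      have hbsM : bs ≠ M := by omega
      refine ⟨K, M, C, ?_, ?_, ?_, ?_⟩
      · simpa [dtLoop, hgt] using hfold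
      · simp [hM, hmax]
      · rw [hC]; by_cases hs : s = M <;> simp [hbsM, hs] <;> omega
      · rw [if_neg hbsM]
        by_cases hs : s = M
        · rw [if_pos hs] at hK; simp [List.find?, hs, hK]
        · rw [if_neg hs] at hK; simpa [List.find?, hs] using hK
    · by_cases heq : s = bs
      · obtain ⟨K, M, C, hfold, hM, hC, hK⟩ := ih bk bs (c + 1)
        have hmax : max bs s = bs := by omega
        refine ⟨K, M, C, ?_, ?_, ?_, ?_⟩
        · simpa [dtLoop, hgt, heq] using hfold
        · simp [hM, hmax]
        · rw [hC]; by_cases hb : bs = M <;> simp [hb, heq] <;> omega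
        · by_cases hb : bs = M
          · rw [if_pos hb] at hK ⊢; exact hK
          · rw [if_neg hb] at hK ⊢; simpa [List.find?, heq ▸ hb] using hK
      · obtain ⟨K, M, C, hfold, hM, hC, hK⟩ := ih bk bs c
        have hlt : s < bs := by omega
        have hmax : max bs s = bs := by omega
        have hbsM : bs ≤ M := by rw [hM]; exact (PySem.List.le_foldl_max _ _).1
        have hsM : s ≠ M := by omega
        refine ⟨K, M, C, ?_, ?_, ?_, ?_⟩
        · simpa [dtLoop, hgt, heq] using hfold
        · simp [hM, hmax]
        · rw [hC]; simp [hsM]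
        · by_cases hb : bs = M
          · rw [if_pos hb] at hK ⊢; exact hK
          · rw [if_neg hb] at hK ⊢; simpa [List.find?, hsM] using hK

-- ===== VERDICT (by name: the statement is the Claim_ definition above) =====
theorem decide_target_spec : Claim_equal_decide_target := by
  intro scores _
  unfold Spec_decide_target decide_target decide_target_alt
  match scores with
  | [] => rfl
  | (k, s) :: t =>
    simp only [List.foldl_cons, dtLoop, reduceCtorEq, if_false]
    obtain ⟨K, M, C, hfold, hM, hC, hK⟩ := dtLoop_fold_char t k s 1
    rw [hfold]
    rw [List.map_cons, PySem.List.max?_id_cons, hM.symm]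
    have hwl : (((k, s) :: t).filter (fun p => p.2 = M)).length = C.toNat := by
      by_cases hs : s = M
      · rw [if_pos hs] at hC; simp only [List.filter_cons, hs, decide_true, if_true,
          List.length_cons, hC]; omega
      · rw [if_neg hs] at hC; simp only [List.filter_cons, hs, decide_false, if_false,
          Bool.false_eq_true, hC]; omega
    have hhead : C = 1 → ((((k, s) :: t).filter (fun p => p.2 = M)).map Prod.fst).head? = some K := by
      intro _
      by_cases hs : s = M
      · rw [if_pos hs] at hK; simp [hs, hK]
      · rw [if_neg hs] at hK
        have hh : (t.filter (fun p => decide (p.2 = M))).head? = some (K, M) := by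
          rw [List.head?_filter]; exact hK
        simp [hs, List.head?_map, hh]
    dsimp only
    by_cases hM0 : M = 0
    · rw [if_pos hM0, if_pos (Or.inl hM0)]
    · rw [if_neg hM0]
      by_cases hC1 : C = 1
      · have hlen : ((((k, s) :: t).filter (fun p => p.2 = M)).map Prod.fst).length = 1 := by
          simp only [List.length_map, hwl]; omega
        rw [if_pos hlen, hhead hC1, if_neg]
        intro h; exact h.elim hM0 (fun h' => h' hC1)
      · have hne : ((((k, s) :: t).filter (fun p => p.2 = M)).map Prod.fst).length ≠ 1 := by
          simp only [List.length_map, hwl]; omega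
        rw [if_neg hne, if_pos (Or.inr hC1)]
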